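-- pv_equiv track=rewrite | github.com/ashensn0w/Emotion-Recognition-System | backend/preprocessing/narrative_features.py | extract_aspect
-- ===== SOURCE A (Python) =====
-- def extract_aspect(sentence):
--     aspect_indicators = [
--         'when', 'while', 'since', 'until', 'before', 'after', 'during',
--         'throughout', 'simultaneously', 'concurrently', 'previously',
--         'subsequently', 'immediately', 'soon', 'later', 'frequently',
--         'occasionally', 'rarely', 'never', 'always', 'daily', 'weekly',
--         'monthly', 'yearly', 'patuloy', 'nagpatuloy', 'patuloy na nangyayari',
--         'nangyayari', 'natapos', 'nagpapatuloy', 'nagsimula', 'nagwakas',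
--         'nagsisimula', 'natatapos', 'nagaganap', 'patuloy na', 'nangyayari pa',
--         'nagsisimula pa lang', 'nagsimula na', 'patuloy na nagaganap',
--         'nagtatapos', 'nagsimula', 'natapos na', 'nagsimula', 'natapos na',
--         'nagpatuloy', 'natapos na', 'nagsimula', 'natapos na', 'nagpatuloy',
--         'natapos na', 'nagsimula', 'natapos na', 'nagpatuloy', 'nagsimula',
--         'natapos na', 'nagpatuloy', 'natapos na', 'nagsimula', 'natapos na',
--         'nagpatuloy', 'nagsimula', 'natapos na'
--     ]
--     return int(any(indicator in sentence for indicator in aspect_indicators))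
-- ===== SOURCE B (Python) =====
-- # B: the 63-entry indicator list of A is redundant — every entry contains one of
-- # the 33 substring-minimal words below (e.g. 'nagpatuloy', 'patuloy na nagaganap'
-- # all contain 'patuloy'; 'natapos na' contains 'natapos'), so membership of any
-- # indicator is equivalent to membership of a minimal word.  B scans the sentence
-- # once, position by position, testing the minimal words as prefixes.
-- _MIN_WORDS = (
--     'when', 'while', 'since', 'until', 'before', 'after', 'during',
--     'throughout', 'simultaneously', 'concurrently', 'previously',
--     'subsequently', 'immediately', 'soon', 'later', 'frequently',
--     'occasionally', 'rarely', 'never', 'always', 'daily', 'weekly',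
--     'monthly', 'yearly', 'patuloy', 'nangyayari', 'natapos', 'nagsimula',
--     'nagwakas', 'nagsisimula', 'natatapos', 'nagaganap', 'nagtatapos',
-- )
--
--
-- def extract_aspect(sentence):
--     for i in range(len(sentence)):
--         for w in _MIN_WORDS:
--             if sentence.startswith(w, i):
--                 return 1
--     return 0
-- ===== Notes on version B (the rewrite author's own statement) =====
-- stated objective: alternative
-- what changed: B replaces A's 63-entry indicator list and per-word substring searches by a precomputed 33-word substring-minimal set (every original indicator contains one of them) and a single position-by-position scan of the sentence testing those words as prefixes.
import Mathlib
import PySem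

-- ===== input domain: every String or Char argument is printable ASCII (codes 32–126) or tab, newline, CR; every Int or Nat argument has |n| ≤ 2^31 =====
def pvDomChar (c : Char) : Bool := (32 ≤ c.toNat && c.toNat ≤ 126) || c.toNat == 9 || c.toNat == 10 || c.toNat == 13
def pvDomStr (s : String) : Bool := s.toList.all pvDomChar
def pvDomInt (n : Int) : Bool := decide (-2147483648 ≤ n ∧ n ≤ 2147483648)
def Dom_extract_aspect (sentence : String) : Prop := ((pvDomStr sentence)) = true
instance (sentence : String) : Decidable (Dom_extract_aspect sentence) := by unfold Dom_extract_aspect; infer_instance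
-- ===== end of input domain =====

-- B replaces A's 63-entry list and per-word substring searches by a 33-word
-- substring-minimal set and one position-by-position prefix scan (objective: alternative).

-- ===== PORT A =====
-- A's literal aspect_indicators list (duplicates kept exactly as written).
def aspectIndicatorWords : List String :=
  ["when", "while", "since", "until", "before", "after", "during",
   "throughout", "simultaneously", "concurrently", "previously",
   "subsequently", "immediately", "soon", "later", "frequently",
   "occasionally", "rarely", "never", "always", "daily", "weekly",
   "monthly", "yearly", "patuloy", "nagpatuloy", "patuloy na nangyayari",
   "nangyayari", "natapos", "nagpapatuloy", "nagsimula", "nagwakas",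
   "nagsisimula", "natatapos", "nagaganap", "patuloy na", "nangyayari pa",
   "nagsisimula pa lang", "nagsimula na", "patuloy na nagaganap",
   "nagtatapos", "nagsimula", "natapos na", "nagsimula", "natapos na",
   "nagpatuloy", "natapos na", "nagsimula", "natapos na", "nagpatuloy",
   "natapos na", "nagsimula", "natapos na", "nagpatuloy", "nagsimula",
   "natapos na", "nagpatuloy", "natapos na", "nagsimula", "natapos na",
   "nagpatuloy", "nagsimula", "natapos na"]

-- int(any(indicator in sentence for indicator in aspect_indicators))
def extract_aspect (sentence : String) : Int :=
  if aspectIndicatorWords.any (fun w => PySem.Str.isIn w sentence) then 1 else 0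

-- ===== PORT B =====
-- _MIN_WORDS: the substring-minimal indicator words (every word of A's list
-- contains one of them; proved below in minCovers).
def minAspectWords : List String :=
  ["when", "while", "since", "until", "before", "after", "during",
   "throughout", "simultaneously", "concurrently", "previously",
   "subsequently", "immediately", "soon", "later", "frequently",
   "occasionally", "rarely", "never", "always", "daily", "weekly",
   "monthly", "yearly", "patuloy", "nangyayari", "natapos", "nagsimula",
   "nagwakas", "nagsisimula", "natatapos", "nagaganap", "nagtatapos"]

-- sentence.startswith(w, i): hand-written char-by-char prefix test.
def prefAt : List Char → List Char → Bool
  | [], _ => true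
  | _ :: _, [] => false
  | a :: as, b :: bs => a == b && prefAt as bs

-- the 'for i in range(len(sentence))' loop, as recursion on the suffix at i.
def scanMin : List Char → Int
  | [] => 0
  | c :: rest => if minAspectWords.any (fun w => prefAt w.toList (c :: rest)) then 1 else scanMin rest

def extract_aspect_alt (sentence : String) : Int :=
  scanMin sentence.toList

-- ===== PRECONDITION & SPEC =====
def Spec_extract_aspect (sentence : String) (out : Int) : Prop := out = extract_aspect_alt sentence
instance (sentence : String) (out : Int) : Decidable (Spec_extract_aspect sentence out) := by unfold Spec_extract_aspect; infer_instance

-- ===== CLAIM =====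
def Claim_equal_extract_aspect : Prop := ∀ (sentence : String), Dom_extract_aspect sentence → Spec_extract_aspect sentence (extract_aspect sentence)

-- ===== LEMMAS AND PROOFS =====

theorem prefAt_eq_isPrefixOf : ∀ (w cs : List Char), prefAt w cs = w.isPrefixOf cs := by
  intro w
  induction w with
  | nil => intro cs; cases cs <;> rfl
  | cons a as ih => intro cs; cases cs with
    | nil => rfl
    | cons b bs => simp [prefAt, List.isPrefixOf, ih]

-- the scan returns 1 iff some minimal word is an infix of the scanned list
theorem scanMin_eq :
    ∀ cs : List Char,
      scanMin cs = if minAspectWords.any (fun w => decide (w.toList <:+: cs)) then 1 else 0 := by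
  intro cs
  induction cs with
  | nil =>
      have hfalse : minAspectWords.any (fun w => decide (w.toList <:+: ([] : List Char))) = false := by
        decide
      rw [scanMin, hfalse]; simp
  | cons c rest ih =>
      have key : minAspectWords.any (fun w => decide (w.toList <:+: (c :: rest)))
          = (minAspectWords.any (fun w => prefAt w.toList (c :: rest))
             || minAspectWords.any (fun w => decide (w.toList <:+: rest))) := by
        rw [Bool.eq_iff_iff]
        simp only [List.any_eq_true, Bool.or_eq_true, decide_eq_true_eq,
          prefAt_eq_isPrefixOf, List.isPrefixOf_iff_prefix, List.infix_cons_iff]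
        constructor
        · rintro ⟨w, hw, hp | hi⟩
          · exact Or.inl ⟨w, hw, hp⟩
          · exact Or.inr ⟨w, hw, hi⟩
        · rintro (⟨w, hw, hp⟩ | ⟨w, hw, hi⟩)
          · exact ⟨w, hw, Or.inl hp⟩
          · exact ⟨w, hw, Or.inr hi⟩
      rw [scanMin, ih, key]
      cases hpre : minAspectWords.any (fun w => prefAt w.toList (c :: rest)) <;>
        cases hinf : minAspectWords.any (fun w => decide (w.toList <:+: rest)) <;> simp

-- every minimal word is one of A's indicator words
set_option maxRecDepth 8192 in
theorem minSubset : ∀ m ∈ minAspectWords, m ∈ aspectIndicatorWords := by decide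

-- every indicator word of A contains some minimal word as a substring
set_option maxRecDepth 8192 in
theorem minCovers :
    ∀ w ∈ aspectIndicatorWords, ∃ m ∈ minAspectWords, m.toList <:+: w.toList := by decide

-- hence the two membership conditions agree on every sentence
theorem cond_eq (sentence : String) :
    minAspectWords.any (fun w => decide (w.toList <:+: sentence.toList))
      = aspectIndicatorWords.any (fun w => PySem.Str.isIn w sentence) := by
  rw [Bool.eq_iff_iff]
  simp only [List.any_eq_true, decide_eq_true_eq, PySem.Str.isIn_eq,
    PySem.Chars.isIn_iff_infix]
  constructor
  · rintro ⟨m, hm, hi⟩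
    exact ⟨m, minSubset m hm, hi⟩
  · rintro ⟨w, hw, hi⟩
    obtain ⟨m, hm, hmw⟩ := minCovers w hw
    exact ⟨m, hm, hmw.trans hi⟩

-- ===== VERDICT =====
theorem extract_aspect_spec : Claim_equal_extract_aspect := by
  intro sentence _
  unfold Spec_extract_aspect extract_aspect extract_aspect_alt
  rw [scanMin_eq, cond_eq]
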